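-- pv_equiv track=rewrite | github.com/CiscoLearning/tutorial-platform-specs | specs/002-enhanced-markdown-validation/reference-code/clean_markdown.py | fix_trailing_whitespace
-- ===== SOURCE A (Python) =====
-- def fix_trailing_whitespace(content: str) -> tuple[str, int]:
--     """
--     Remove trailing whitespace from all lines (T030).
--
--     Returns:
--         Tuple of (fixed_content, number_of_fixes)
--     """
--     lines = content.split('\n')
--     fixed_lines = []
--     fix_count = 0
--
--     in_code_block = False
--     for line in lines:
--         if line.strip().startswith('```'):
--             in_code_block = not in_code_block
--
--         if not in_code_block and line != line.rstrip():
--             fixed_lines.append(line.rstrip())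
--             fix_count += 1
--         else:
--             fixed_lines.append(line)
--
--     return '\n'.join(fixed_lines), fix_count
-- ===== SOURCE B (Python) =====
-- def fix_trailing_whitespace(content: str) -> tuple[str, int]:
--     """Two-pass rewrite: precompute per-line code-block parity, then strip/count by comprehension."""
--     lines = content.split('\n')
--     in_code = []
--     parity = False
--     for line in lines:
--         parity ^= line.strip().startswith('```')
--         in_code.append(parity)
--     out = [line if ic else line.rstrip() for line, ic in zip(lines, in_code)]
--     fixes = sum(1 for line, new in zip(lines, out) if new != line)
--     return '\n'.join(out), fixes
-- ===== Notes on version B (the rewrite author's own statement) =====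
-- stated objective: alternative
-- what changed: Replaces A's single stateful loop (accumulator list + counter + toggle) with two passes: a precomputed parallel code-block-parity list, then a zip comprehension that strips, with the fix count taken as a separate sum over changed lines.
import Mathlib
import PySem

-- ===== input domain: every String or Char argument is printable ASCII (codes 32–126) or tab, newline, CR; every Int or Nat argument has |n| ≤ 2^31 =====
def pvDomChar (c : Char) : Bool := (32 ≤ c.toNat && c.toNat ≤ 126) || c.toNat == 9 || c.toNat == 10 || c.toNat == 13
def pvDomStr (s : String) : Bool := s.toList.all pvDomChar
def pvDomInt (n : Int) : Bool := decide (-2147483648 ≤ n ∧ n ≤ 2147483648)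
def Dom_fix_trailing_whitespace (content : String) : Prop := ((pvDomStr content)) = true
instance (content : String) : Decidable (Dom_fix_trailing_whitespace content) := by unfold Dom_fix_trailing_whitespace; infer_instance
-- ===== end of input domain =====

-- B replaces A's single stateful loop by a precomputed code-block-parity list plus a strip/count pass (alternative decomposition, same cost).

-- ===== PORT A =====
-- literal transliteration of A: one fold carrying (fixed_lines, fix_count, in_code_block)
def fix_trailing_whitespace (content : String) : String × Int :=
  let lines := PySem.Chars.splitOn content.toList ['\n']
  let r := lines.foldl (fun (st : List (List Char) × Int × Bool) line =>
    let inCode := if PySem.Chars.startswith (PySem.Chars.strip line) ['`','`','`'] then !st.2.2 else st.2.2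
    if !inCode && (line != PySem.Chars.rstrip line) then
      (st.1 ++ [PySem.Chars.rstrip line], st.2.1 + 1, inCode)
    else
      (st.1 ++ [line], st.2.1, inCode)) ([], 0, false)
  (String.ofList (PySem.Chars.join ['\n'] r.1), r.2.1)

-- ===== PORT B =====
-- literal transliteration of B: build the in_code parity list, then strip by zip-map and count by filter
def fix_trailing_whitespace_alt (content : String) : String × Int :=
  let lines := PySem.Chars.splitOn content.toList ['\n']
  let inCode := (lines.foldl (fun (st : List Bool × Bool) line =>
    let p := Bool.xor st.2 (PySem.Chars.startswith (PySem.Chars.strip line) ['`','`','`'])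
    (st.1 ++ [p], p)) ([], false)).1
  let out := (lines.zip inCode).map (fun li => if li.2 then li.1 else PySem.Chars.rstrip li.1)
  let fixes := ((lines.zip out).filter (fun ln => ln.2 != ln.1)).length
  (String.ofList (PySem.Chars.join ['\n'] out), (fixes : Int))

-- ===== PRECONDITION & SPEC =====
def Spec_fix_trailing_whitespace (content : String) (out : String × Int) : Prop := out = fix_trailing_whitespace_alt content
instance (content : String) (out : String × Int) : Decidable (Spec_fix_trailing_whitespace content out) := by unfold Spec_fix_trailing_whitespace; infer_instance

-- ===== CLAIM (what is proved, stated in full; the proofs are below) =====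
def Claim_equal_fix_trailing_whitespace : Prop := ∀ (content : String), Dom_fix_trailing_whitespace content → Spec_fix_trailing_whitespace content (fix_trailing_whitespace content)

-- ===== LEMMAS AND PROOFS =====

/-- fence-line test shared by the statements of the proof lemmas -/
def pvFence (l : List Char) : Bool := PySem.Chars.startswith (PySem.Chars.strip l) ['`','`','`']

/-- the per-line code-block parity list (parity including the current line) -/
def pvPar : List (List Char) → Bool → List Bool
  | [], _ => []
  | l :: ls, b => Bool.xor b (pvFence l) :: pvPar ls (Bool.xor b (pvFence l))

/-- final parity after a block of lines -/
def pvParEnd : List (List Char) → Bool → Bool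
  | [], b => b
  | l :: ls, b => pvParEnd ls (Bool.xor b (pvFence l))

/-- the stripped output lines, given the starting parity -/
def pvOut (ls : List (List Char)) (b : Bool) : List (List Char) :=
  (ls.zip (pvPar ls b)).map (fun li => if li.2 then li.1 else PySem.Chars.rstrip li.1)

/-- the fix count, given the starting parity -/
def pvCnt : List (List Char) → Bool → Int
  | [], _ => 0
  | l :: ls, b =>
    let p := Bool.xor b (pvFence l)
    (if !p && (l != PySem.Chars.rstrip l) then 1 else 0) + pvCnt ls p

theorem pvB_fold (ls : List (List Char)) : ∀ (acc : List Bool) (b : Bool),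
    ls.foldl (fun (st : List Bool × Bool) line =>
      let p := Bool.xor st.2 (PySem.Chars.startswith (PySem.Chars.strip line) ['`','`','`'])
      (st.1 ++ [p], p)) (acc, b) = (acc ++ pvPar ls b, pvParEnd ls b) := by
  induction ls with
  | nil => intro acc b; simp [pvPar, pvParEnd]
  | cons l ls ih => intro acc b; simp [pvPar, pvParEnd, pvFence, ih]

theorem pvOut_cons (l : List Char) (ls : List (List Char)) (b : Bool) :
    pvOut (l :: ls) b =
      (if Bool.xor b (pvFence l) then l else PySem.Chars.rstrip l) :: pvOut ls (Bool.xor b (pvFence l)) := by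
  simp [pvOut, pvPar]

/-- A's loop body as a named function -/
def pvStep (st : List (List Char) × Int × Bool) (l : List Char) : List (List Char) × Int × Bool :=
  let p := Bool.xor st.2.2 (pvFence l)
  (st.1 ++ [if p then l else PySem.Chars.rstrip l],
   st.2.1 + (if !p && (l != PySem.Chars.rstrip l) then 1 else 0), p)

theorem pvStep_eq : (fun (st : List (List Char) × Int × Bool) line =>
    let inCode := if PySem.Chars.startswith (PySem.Chars.strip line) ['`','`','`'] then !st.2.2 else st.2.2
    if !inCode && (line != PySem.Chars.rstrip line) then
      (st.1 ++ [PySem.Chars.rstrip line], st.2.1 + 1, inCode)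
    else
      (st.1 ++ [line], st.2.1, inCode)) = pvStep := by
  funext st line
  simp only [pvStep, pvFence]
  cases h2 : st.2.2 <;>
    rcases Bool.eq_false_or_eq_true (PySem.Chars.startswith (PySem.Chars.strip line) ['`','`','`']) with hf | hf <;>
    rcases eq_or_ne line (PySem.Chars.rstrip line) with hr | hr <;>
    simp [hf, hr.symm] <;> simp [hr]

theorem pvStep_fold (ls : List (List Char)) : ∀ (acc : List (List Char)) (cnt : Int) (b : Bool),
    ls.foldl pvStep (acc, cnt, b) = (acc ++ pvOut ls b, cnt + pvCnt ls b, pvParEnd ls b) := by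
  induction ls with
  | nil => intro acc cnt b; simp [pvOut, pvPar, pvCnt, pvParEnd]
  | cons l ls ih =>
    intro acc cnt b
    rw [List.foldl_cons,
      show pvStep (acc, cnt, b) l =
        (acc ++ [if Bool.xor b (pvFence l) then l else PySem.Chars.rstrip l],
         cnt + (if !(Bool.xor b (pvFence l)) && (l != PySem.Chars.rstrip l) then 1 else 0),
         Bool.xor b (pvFence l)) from rfl,
      ih, pvOut_cons]
    simp [pvCnt, pvParEnd, add_assoc]

theorem pvA_fold (ls : List (List Char)) : ∀ (acc : List (List Char)) (cnt : Int) (b : Bool),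
    ls.foldl (fun (st : List (List Char) × Int × Bool) line =>
      let inCode := if PySem.Chars.startswith (PySem.Chars.strip line) ['`','`','`'] then !st.2.2 else st.2.2
      if !inCode && (line != PySem.Chars.rstrip line) then
        (st.1 ++ [PySem.Chars.rstrip line], st.2.1 + 1, inCode)
      else
        (st.1 ++ [line], st.2.1, inCode)) (acc, cnt, b)
    = (acc ++ pvOut ls b, cnt + pvCnt ls b, pvParEnd ls b) := by
  rw [pvStep_eq]
  exact pvStep_fold ls

theorem pvCnt_eq_filter (ls : List (List Char)) : ∀ (b : Bool),
    (((ls.zip (pvOut ls b)).filter (fun ln => ln.2 != ln.1)).length : Int) = pvCnt ls b := by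
  induction ls with
  | nil => intro b; simp [pvOut, pvPar, pvCnt]
  | cons l ls ih =>
    intro b
    rw [pvOut_cons]
    simp only [List.zip_cons_cons, List.filter_cons, pvCnt]
    by_cases hp : (Bool.xor b (pvFence l)) = true
    · simp [hp]; exact ih true
    · simp only [Bool.not_eq_true] at hp
      by_cases hr : l = PySem.Chars.rstrip l
      · simp [hp, ← hr]; exact ih false
      · have hne : (PySem.Chars.rstrip l != l) = true := by
          simp [bne_iff_ne]; exact fun h => hr h.symm
        have h := ih false
        simp [hp, hr, hne]
        omega

-- ===== VERDICT (by name: the statement is the Claim_ definition above) =====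
theorem fix_trailing_whitespace_spec : Claim_equal_fix_trailing_whitespace := by
  intro content _
  unfold Spec_fix_trailing_whitespace fix_trailing_whitespace fix_trailing_whitespace_alt
  simp only []
  rw [show ((fun (st : List Bool × Bool) line =>
      let p := Bool.xor st.2 (PySem.Chars.startswith (PySem.Chars.strip line) ['`','`','`'])
      (st.1 ++ [p], p)) = (fun (st : List Bool × Bool) line =>
      (st.1 ++ [Bool.xor st.2 (PySem.Chars.startswith (PySem.Chars.strip line) ['`','`','`'])],
       Bool.xor st.2 (PySem.Chars.startswith (PySem.Chars.strip line) ['`','`','`'])))) from rfl]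
  rw [pvA_fold, pvB_fold]
  simp [pvOut, ← pvCnt_eq_filter]
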